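-- pv_equiv track=rewrite | github.com/sutaburosu/FastLED | ci/lint_cpp/noexcept_special_members_checker.py | _ensure_include
-- ===== SOURCE A (Python) =====
-- _NOEXCEPT_INCLUDE = '#include "fl/stl/noexcept.h"'
--
-- def _ensure_include(content: str) -> str:
--     """Ensure ``#include "fl/stl/noexcept.h"`` is present when FL_NOEXCEPT is used."""
--     if "fl/stl/noexcept.h" in content:
--         return content
--     if "FL_NOEXCEPT" not in content:
--         return content
--
--     lines = content.split("\n")
--     insert_idx = 0
--     for i, ln in enumerate(lines):
--         stripped = ln.strip()
--         if stripped.startswith("#include"):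
--             insert_idx = i + 1
--         elif stripped == "#pragma once" and insert_idx == 0:
--             insert_idx = i + 1
--     lines.insert(insert_idx, _NOEXCEPT_INCLUDE)
--     return "\n".join(lines)
-- ===== SOURCE B (Python) =====
-- _NOEXCEPT_INCLUDE = '#include "fl/stl/noexcept.h"'
--
--
-- def _ensure_include(content: str) -> str:
--     """Ensure ``#include "fl/stl/noexcept.h"`` is present when FL_NOEXCEPT is used."""
--     if "fl/stl/noexcept.h" in content or "FL_NOEXCEPT" not in content:
--         return content
--     lines = content.split("\n")
--     last_include = next(
--         (i for i, ln in reversed(list(enumerate(lines)))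
--          if ln.strip().startswith("#include")),
--         None,
--     )
--     if last_include is not None:
--         insert_idx = last_include + 1
--     else:
--         first_pragma = next(
--             (i for i, ln in enumerate(lines) if ln.strip() == "#pragma once"),
--             None,
--         )
--         insert_idx = first_pragma + 1 if first_pragma is not None else 0
--     lines.insert(insert_idx, _NOEXCEPT_INCLUDE)
--     return "\n".join(lines)
-- ===== Notes on version B (the rewrite author's own statement) =====
-- stated objective: alternative
-- what changed: A's single forward scan with a mutable flag-like index is replaced by two independent early-exit searches: a backward search for the last include-directive line and, only if none exists, a forward search for the first pragma-once line.
import Mathlib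
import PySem

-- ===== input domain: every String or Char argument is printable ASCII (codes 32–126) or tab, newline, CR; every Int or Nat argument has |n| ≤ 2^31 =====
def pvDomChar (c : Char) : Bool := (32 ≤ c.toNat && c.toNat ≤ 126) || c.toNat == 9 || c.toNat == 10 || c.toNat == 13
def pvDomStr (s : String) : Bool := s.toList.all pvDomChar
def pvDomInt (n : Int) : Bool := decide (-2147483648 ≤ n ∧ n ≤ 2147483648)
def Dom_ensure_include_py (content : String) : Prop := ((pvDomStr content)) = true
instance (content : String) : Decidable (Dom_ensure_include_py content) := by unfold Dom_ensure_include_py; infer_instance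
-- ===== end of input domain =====

-- B replaces A's one forward scan with a stateful index by two independent early-exit
-- searches (last include directive from the back, else first pragma-once line); same cost, plainer logic.

def pvNoexceptInclude : String := "#include \"fl/stl/noexcept.h\""

-- ===== PORT A =====
def ensure_include_py (content : String) : String :=
  if PySem.Str.isIn "fl/stl/noexcept.h" content then content
  else if !(PySem.Str.isIn "FL_NOEXCEPT" content) then content
  else
    -- split? is always `some` here: the separator "\n" is a non-empty literal
    let lines := (PySem.Str.split? content "\n").getD []
    let insertIdx : Int :=
      (PySem.List.enumerate lines 0).foldl
        (fun idx p =>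
          let stripped := PySem.Str.strip p.2
          if PySem.Str.startswith stripped "#include" then p.1 + 1
          else if stripped == "#pragma once" && idx == 0 then p.1 + 1
          else idx) 0
    PySem.Str.join "\n" (PySem.List.insert lines insertIdx pvNoexceptInclude)

-- ===== PORT B =====
def ensure_include_py_alt (content : String) : String :=
  if PySem.Str.isIn "fl/stl/noexcept.h" content || !(PySem.Str.isIn "FL_NOEXCEPT" content) then
    content
  else
    -- split? is always `some` here: the separator "\n" is a non-empty literal
    let lines := (PySem.Str.split? content "\n").getD []
    let lastInclude : Option Int :=
      ((PySem.List.enumerate lines 0).reverse.find?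
        (fun p => PySem.Str.startswith (PySem.Str.strip p.2) "#include")).map (·.1)
    let insertIdx : Int :=
      match lastInclude with
      | some i => i + 1
      | none =>
        match ((PySem.List.enumerate lines 0).find?
                (fun p => PySem.Str.strip p.2 == "#pragma once")).map (·.1) with
        | some i => i + 1
        | none => 0
    PySem.Str.join "\n" (PySem.List.insert lines insertIdx pvNoexceptInclude)

-- ===== PRECONDITION & SPEC =====
def Spec_ensure_include_py (content : String) (out : String) : Prop := out = ensure_include_py_alt content
instance (content : String) (out : String) : Decidable (Spec_ensure_include_py content out) := by unfold Spec_ensure_include_py; infer_instance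

-- ===== CLAIM (what is proved, stated in full; the proofs are below) =====
def Claim_equal_ensure_include_py : Prop := ∀ (content : String), Dom_ensure_include_py content → Spec_ensure_include_py content (ensure_include_py content)

-- ===== LEMMAS AND PROOFS =====

-- A's loop body, named so the invariant below can be stated once (definitionally A's lambda).
def pvStep (idx : Int) (p : Int × String) : Int :=
  if PySem.Str.startswith (PySem.Str.strip p.2) "#include" then p.1 + 1
  else if PySem.Str.strip p.2 == "#pragma once" && idx == 0 then p.1 + 1
  else idx

def pvIncP (p : Int × String) : Bool := PySem.Str.startswith (PySem.Str.strip p.2) "#include"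
def pvPragP (p : Int × String) : Bool := PySem.Str.strip p.2 == "#pragma once"

-- Invariant of A's fold over any enumerated suffix: the result is (last include)+1,
-- else the incoming accumulator if non-zero, else (first pragma)+1, else 0.
theorem pv_loop_eq (ls : List String) (s idx : Int) (hs : 0 ≤ s) :
    (PySem.List.enumerate ls s).foldl pvStep idx
    =
    match ((PySem.List.enumerate ls s).reverse.find? pvIncP).map (·.1) with
    | some i => i + 1
    | none =>
      if idx = 0 then
        match ((PySem.List.enumerate ls s).find? pvPragP).map (·.1) with
        | some i => i + 1
        | none => 0
      else idx := by
  induction ls generalizing s idx with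
  | nil => simp [PySem.List.enumerate_nil]
  | cons x xs ih =>
    rw [PySem.List.enumerate_cons, List.foldl_cons, List.reverse_cons, List.find?_append,
      List.find?_cons]
    by_cases hinc : pvIncP (s, x) = true
    · have hstep : pvStep idx (s, x) = s + 1 := by
        have h := hinc; simp only [pvIncP] at h
        unfold pvStep; rw [if_pos h]
      rw [hstep, ih (s + 1) (s + 1) (by omega)]
      cases hfind : ((PySem.List.enumerate xs (s + 1)).reverse.find? pvIncP) with
      | some q => simp
      | none => simp [hinc, if_neg (by omega : ¬ s + 1 = 0)]
    · by_cases hprag : pvPragP (s, x) = true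
      · by_cases hz : idx = 0
        · have hstep : pvStep idx (s, x) = s + 1 := by
            have h := hinc; simp only [pvIncP] at h
            have hp := hprag; simp only [pvPragP] at hp
            unfold pvStep
            rw [if_neg h, if_pos (by subst hz; rw [Bool.and_eq_true]; exact ⟨hp, rfl⟩)]
          rw [hstep, ih (s + 1) (s + 1) (by omega)]
          cases hfind : ((PySem.List.enumerate xs (s + 1)).reverse.find? pvIncP) with
          | some q => simp
          | none => simp [hinc, hprag, hz, if_neg (by omega : ¬ s + 1 = 0)]
        · have hstep : pvStep idx (s, x) = idx := by
            have h := hinc; simp only [pvIncP] at h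
            unfold pvStep
            rw [if_neg h, if_neg (fun hc => hz (by simp at hc; exact hc.2))]
          rw [hstep, ih (s + 1) idx (by omega)]
          cases hfind : ((PySem.List.enumerate xs (s + 1)).reverse.find? pvIncP) with
          | some q => simp
          | none => simp [hinc, hz]
      · have hstep : pvStep idx (s, x) = idx := by
          have h := hinc; simp only [pvIncP] at h
          have hp := hprag; simp only [pvPragP] at hp
          unfold pvStep
          rw [if_neg h, if_neg (fun hc => hp (by simp at hc; rw [beq_iff_eq]; exact hc.1))]
        rw [hstep, ih (s + 1) idx (by omega)]
        cases hfind : ((PySem.List.enumerate xs (s + 1)).reverse.find? pvIncP) with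
        | some q => simp
        | none =>
          by_cases hz : idx = 0
          · simp [hinc, hprag, hz]
          · simp [hinc, hz]

-- The invariant at start index 0 and accumulator 0, with A's and B's literal lambdas.
theorem pv_idx_eq (ls : List String) :
    (PySem.List.enumerate ls 0).foldl
      (fun idx p =>
        let stripped := PySem.Str.strip p.2
        if PySem.Str.startswith stripped "#include" then p.1 + 1
        else if stripped == "#pragma once" && idx == 0 then p.1 + 1
        else idx) 0
    =
    match ((PySem.List.enumerate ls 0).reverse.find?
            (fun p => PySem.Str.startswith (PySem.Str.strip p.2) "#include")).map (·.1) with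
    | some i => i + 1
    | none =>
      match ((PySem.List.enumerate ls 0).find?
              (fun p => PySem.Str.strip p.2 == "#pragma once")).map (·.1) with
      | some i => i + 1
      | none => 0 := by
  have h := pv_loop_eq ls 0 0 le_rfl
  rw [if_pos rfl] at h
  exact h

-- ===== VERDICT (by name: the statement is the Claim_ definition above) =====
theorem ensure_include_py_spec : Claim_equal_ensure_include_py := by
  intro content _
  unfold Spec_ensure_include_py ensure_include_py ensure_include_py_alt
  by_cases h1 : PySem.Str.isIn "fl/stl/noexcept.h" content = true
  · have c : (PySem.Str.isIn "fl/stl/noexcept.h" content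
        || !PySem.Str.isIn "FL_NOEXCEPT" content) = true := by rw [h1]; rfl
    rw [if_pos h1, if_pos c]
  · have h1' : PySem.Str.isIn "fl/stl/noexcept.h" content = false := by
      cases h : PySem.Str.isIn "fl/stl/noexcept.h" content
      · rfl
      · exact absurd h h1
    by_cases h2 : PySem.Str.isIn "FL_NOEXCEPT" content = true
    · have c2 : ¬ ((!PySem.Str.isIn "FL_NOEXCEPT" content) = true) := by rw [h2]; decide
      have c3 : ¬ ((PySem.Str.isIn "fl/stl/noexcept.h" content
          || !PySem.Str.isIn "FL_NOEXCEPT" content) = true) := by rw [h1', h2]; decide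
      rw [if_neg h1, if_neg c2, if_neg c3]
      exact congrArg
        (fun i => PySem.Str.join "\n"
          (PySem.List.insert ((PySem.Str.split? content "\n").getD []) i pvNoexceptInclude))
        (pv_idx_eq ((PySem.Str.split? content "\n").getD []))
    · have h2' : PySem.Str.isIn "FL_NOEXCEPT" content = false := by
        cases h : PySem.Str.isIn "FL_NOEXCEPT" content
        · rfl
        · exact absurd h h2
      have c2 : (!PySem.Str.isIn "FL_NOEXCEPT" content) = true := by rw [h2']; rfl
      have c3 : (PySem.Str.isIn "fl/stl/noexcept.h" content
          || !PySem.Str.isIn "FL_NOEXCEPT" content) = true := by rw [h2']; simp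
      rw [if_neg h1, if_pos c2, if_pos c3]
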